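-- pv_equiv track=rewrite | github.com/naomiblkr/Doc-GEMBA | gemba/testset.py | add_context
-- ===== SOURCE A (Python) =====
-- def add_context(orig_txt, context, doc_ids, ws=2):
--     '''Add preceding context sentences considering document boundaries'''
--     assert len(orig_txt) == len(context) == len(doc_ids), "Length of original text, context and doc ids doesn't match"
--     i, k = 0, 0
--     augm_txt = []
--     doc_id = doc_ids[0]
--     while i < len(orig_txt):
--         if doc_ids[i] == doc_id:
--             context_window = context[i - min(k, ws):i]
--             augm_txt.append(" ".join(context_window + [orig_txt[i]]))
--             i += 1
--         else:
--             doc_id = doc_ids[i]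
--             k = -1
--         k += 1
--     return augm_txt
-- ===== SOURCE B (Python) =====
-- def add_context(orig_txt, context, doc_ids, ws=2):
--     '''Add preceding context sentences considering document boundaries'''
--     assert len(orig_txt) == len(context) == len(doc_ids), "Length of original text, context and doc ids doesn't match"
--     augm_txt = []
--     n = len(orig_txt)
--     s = 0
--     while s < n:
--         e = s + 1
--         while e < n and doc_ids[e] == doc_ids[s]:
--             e += 1
--         for i in range(s, e):
--             augm_txt.append(" ".join(context[max(s, i - ws):i] + [orig_txt[i]]))
--         s = e
--     return augm_txt
-- ===== Notes on version B (the rewrite author's own statement) =====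
-- stated objective: alternative
-- what changed: A is a single while-loop with a running within-document counter k that it resets (via k=-1 and a non-advancing iteration) at each document boundary; B first segments the indices into maximal runs of equal doc_ids with an explicit boundary scan and then, per run, joins context[max(run_start, i-ws):i] with the sentence.
import Mathlib
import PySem

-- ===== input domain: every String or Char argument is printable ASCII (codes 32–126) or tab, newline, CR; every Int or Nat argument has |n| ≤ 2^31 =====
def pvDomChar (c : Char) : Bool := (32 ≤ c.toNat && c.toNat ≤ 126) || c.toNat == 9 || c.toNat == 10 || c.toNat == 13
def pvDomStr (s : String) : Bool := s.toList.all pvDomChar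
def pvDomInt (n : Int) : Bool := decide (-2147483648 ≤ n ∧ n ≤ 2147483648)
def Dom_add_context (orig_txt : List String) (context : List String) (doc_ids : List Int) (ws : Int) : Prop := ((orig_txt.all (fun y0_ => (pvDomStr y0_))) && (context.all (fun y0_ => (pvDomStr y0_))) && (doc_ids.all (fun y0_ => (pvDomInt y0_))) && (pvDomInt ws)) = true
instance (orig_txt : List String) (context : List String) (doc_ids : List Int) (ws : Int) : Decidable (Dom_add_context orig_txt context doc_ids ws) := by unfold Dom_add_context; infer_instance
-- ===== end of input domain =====

-- B segments indices into maximal runs of equal doc_ids and emits each run with max(run_start, i-ws);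
-- A is one while-loop with a counter k reset at boundaries. Same return values wherever A returns (Pre_).

-- ===== PORT A =====
-- A's while-loop: state (i, k, doc_id, augm_txt); the else branch (k = -1; k += 1) passes k = 0.
def addCtxLoopA (orig_txt : List String) (context : List String) (doc_ids : List Int) (ws : Int)
    (i : Nat) (k : Int) (doc_id : Int) (acc : List String) : List String :=
  if h : i < orig_txt.length then
    if hd : doc_ids.getD i 0 = doc_id then
      addCtxLoopA orig_txt context doc_ids ws (i + 1) (k + 1) doc_id
        (acc ++ [PySem.Str.join " "
          (PySem.List.slice context (some ((i : Int) - min k ws)) (some (i : Int)) ++ [orig_txt.getD i ""])])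
    else
      addCtxLoopA orig_txt context doc_ids ws i 0 (doc_ids.getD i 0) acc
  else acc
termination_by (orig_txt.length - i, if doc_ids.getD i 0 = doc_id then 0 else 1)
decreasing_by
  · apply Prod.Lex.left; omega
  · apply Prod.Lex.right; simp only [List.getD] at hd; simp [hd]

def add_context (orig_txt : List String) (context : List String) (doc_ids : List Int) (ws : Int) : List String :=
  -- the assert and doc_ids[0] raise exactly outside Pre_add_context
  addCtxLoopA orig_txt context doc_ids ws 0 0 (doc_ids.getD 0 0) []

-- ===== PORT B =====
-- inner while: end of the maximal run of value v starting at e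
def runEndB (doc_ids : List Int) (n : Nat) (v : Int) (e : Nat) : Nat :=
  if h : e < n ∧ doc_ids.getD e 0 = v then runEndB doc_ids n v (e + 1) else e
termination_by n - e
decreasing_by omega

theorem runEndB_ge (doc_ids : List Int) (n : Nat) (v : Int) (e : Nat) : e ≤ runEndB doc_ids n v e := by
  fun_induction runEndB <;> omega

def addCtxLoopB (orig_txt : List String) (context : List String) (doc_ids : List Int) (ws : Int)
    (s : Nat) (acc : List String) : List String :=
  if h : s < orig_txt.length then
    addCtxLoopB orig_txt context doc_ids ws
      (runEndB doc_ids orig_txt.length (doc_ids.getD s 0) (s + 1))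
      (acc ++ (List.range' s (runEndB doc_ids orig_txt.length (doc_ids.getD s 0) (s + 1) - s)).map
        (fun (i : Nat) => PySem.Str.join " "
          (PySem.List.slice context (some (max (s : Int) ((i : Int) - ws))) (some (i : Int)) ++ [orig_txt.getD i ""])))
  else acc
termination_by orig_txt.length - s
decreasing_by
  have := runEndB_ge doc_ids orig_txt.length (doc_ids.getD s 0) (s + 1); omega

def add_context_alt (orig_txt : List String) (context : List String) (doc_ids : List Int) (ws : Int) : List String :=
  addCtxLoopB orig_txt context doc_ids ws 0 []

-- ===== PRECONDITION & SPEC =====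
-- Pre_ excludes exactly the inputs where Python A raises: mismatched lengths (AssertionError) and
-- the empty input (IndexError at doc_ids[0]).
def Pre_add_context (orig_txt : List String) (context : List String) (doc_ids : List Int) (ws : Int) : Prop :=
  orig_txt ≠ [] ∧ orig_txt.length = context.length ∧ context.length = doc_ids.length
instance (orig_txt : List String) (context : List String) (doc_ids : List Int) (ws : Int) : Decidable (Pre_add_context orig_txt context doc_ids ws) := by unfold Pre_add_context; infer_instance
def pvWitness_add_context : List String × List String × List Int × Int := (["a", "b"], ["c", "d"], [1, 1], 2)

def Spec_add_context (orig_txt : List String) (context : List String) (doc_ids : List Int) (ws : Int) (out : List String) : Prop := out = add_context_alt orig_txt context doc_ids ws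
instance (orig_txt : List String) (context : List String) (doc_ids : List Int) (ws : Int) (out : List String) : Decidable (Spec_add_context orig_txt context doc_ids ws out) := by unfold Spec_add_context; infer_instance

-- ===== CLAIM (what is proved, stated in full; the proofs are below) =====
def Claim_equal_add_context : Prop := ∀ (orig_txt : List String) (context : List String) (doc_ids : List Int) (ws : Int), Dom_add_context orig_txt context doc_ids ws → Pre_add_context orig_txt context doc_ids ws → Spec_add_context orig_txt context doc_ids ws (add_context orig_txt context doc_ids ws)

-- ===== LEMMAS AND PROOFS =====

theorem runEndB_le (doc_ids : List Int) (n : Nat) (v : Int) (e : Nat) (h : e ≤ n) :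
    runEndB doc_ids n v e ≤ n := by
  fun_induction runEndB <;> omega

theorem runEndB_run (doc_ids : List Int) (n : Nat) (v : Int) (e : Nat) :
    ∀ j, e ≤ j → j < runEndB doc_ids n v e → doc_ids.getD j 0 = v := by
  fun_induction runEndB with
  | case1 e h ih =>
    intro j h1 h2
    rcases Nat.eq_or_lt_of_le h1 with rfl | h1'
    · exact h.2
    · exact ih j h1' h2
  | case2 e h => intro j h1 h2; omega

theorem runEndB_stop (doc_ids : List Int) (n : Nat) (v : Int) (e : Nat)
    (h : runEndB doc_ids n v e < n) : doc_ids.getD (runEndB doc_ids n v e) 0 ≠ v := by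
  fun_induction runEndB with
  | case1 e h' ih => exact ih h
  | case2 e h' =>
    intro hv
    exact h' ⟨h, hv⟩

-- the two slice starts are the same integer once k = i - s
theorem sliceStart_eq (s i : Nat) (ws : Int) (h : s ≤ i) :
    (i : Int) - min ((i : Int) - (s : Int)) ws = max (s : Int) ((i : Int) - ws) := by
  omega

-- A's loop walks one run [j, e) of value v exactly as B's inner for-loop does
theorem chainA (orig_txt : List String) (context : List String) (doc_ids : List Int) (ws : Int)
    (v : Int) (s e : Nat) (he : e ≤ orig_txt.length)
    (hrun : ∀ m, s ≤ m → m < e → doc_ids.getD m 0 = v) :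
    ∀ fuel j acc, e - j ≤ fuel → s ≤ j → j ≤ e →
      addCtxLoopA orig_txt context doc_ids ws j ((j : Int) - (s : Int)) v acc
        = addCtxLoopA orig_txt context doc_ids ws e ((e : Int) - (s : Int)) v
            (acc ++ (List.range' j (e - j)).map
              (fun (i : Nat) => PySem.Str.join " "
                (PySem.List.slice context (some (max (s : Int) ((i : Int) - ws))) (some (i : Int)) ++ [orig_txt.getD i ""]))) := by
  intro fuel
  induction fuel with
  | zero =>
    intro j acc hf h1 h2
    have : j = e := by omega
    subst this
    simp
  | succ f ih =>
    intro j acc hf h1 h2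
    rcases Nat.eq_or_lt_of_le h2 with rfl | hlt
    · simp
    · rw [addCtxLoopA]
      have hjlen : j < orig_txt.length := by omega
      rw [dif_pos hjlen, dif_pos (hrun j h1 hlt)]
      have hk : ((j : Int) - (s : Int)) + 1 = ((j + 1 : Nat) : Int) - (s : Int) := by push_cast; omega
      rw [hk, sliceStart_eq s j ws h1]
      rw [ih (j + 1) _ (by omega) (by omega) (by omega)]
      congr 1
      have hr : e - j = (e - (j + 1)) + 1 := by omega
      rw [hr, List.range'_succ, List.map_cons]
      simp

theorem loopAB (orig_txt : List String) (context : List String) (doc_ids : List Int) (ws : Int)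
    (s : Nat) (acc : List String) :
    addCtxLoopA orig_txt context doc_ids ws s 0 (doc_ids.getD s 0) acc
      = addCtxLoopB orig_txt context doc_ids ws s acc := by
  by_cases h : s < orig_txt.length
  · have hge := runEndB_ge doc_ids orig_txt.length (doc_ids.getD s 0) (s + 1)
    have hle := runEndB_le doc_ids orig_txt.length (doc_ids.getD s 0) (s + 1) (by omega)
    set e := runEndB doc_ids orig_txt.length (doc_ids.getD s 0) (s + 1) with he
    have hrun : ∀ m, s ≤ m → m < e → doc_ids.getD m 0 = doc_ids.getD s 0 := by
      intro m h1 h2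
      rcases Nat.eq_or_lt_of_le h1 with rfl | h1'
      · rfl
      · exact runEndB_run doc_ids orig_txt.length (doc_ids.getD s 0) (s + 1) m h1' h2
    have hch := chainA orig_txt context doc_ids ws (doc_ids.getD s 0) s e hle hrun (e - s) s acc
        (le_refl _) (le_refl _) (by omega)
    have hz : ((s : Int) - (s : Int)) = 0 := by omega
    rw [hz] at hch
    rw [hch, addCtxLoopB, dif_pos h]
    by_cases h2 : e < orig_txt.length
    · rw [addCtxLoopA, dif_pos h2,
        dif_neg (runEndB_stop doc_ids orig_txt.length (doc_ids.getD s 0) (s + 1) h2)]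
      exact loopAB orig_txt context doc_ids ws e _
    · rw [addCtxLoopA, dif_neg h2, addCtxLoopB, dif_neg h2]
  · rw [addCtxLoopA, dif_neg h, addCtxLoopB, dif_neg h]
termination_by orig_txt.length - s
decreasing_by
  have := runEndB_ge doc_ids orig_txt.length (doc_ids.getD s 0) (s + 1); omega

-- ===== VERDICT (by name: the statement is the Claim_ definition above) =====
theorem add_context_spec : Claim_equal_add_context := by
  intro orig_txt context doc_ids ws _ _
  exact loopAB orig_txt context doc_ids ws 0 []
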